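-- pv_equiv track=rewrite | github.com/EllieBril/Analytics-for-Society-2026-x-UCL | src/inventory.py | _unit_of_observation
-- ===== SOURCE A (Python) =====
-- def _unit_of_observation(columns: list[str]) -> str:
--     lowered = {c.lower() for c in columns}
--     if "cnttchid" in lowered or "teacherid" in lowered:
--         return "teacher"
--     if "cntstuid" in lowered or "studentid" in lowered or "stidstd" in lowered:
--         return "student"
--     if "cntschid" in lowered or "schoolid" in lowered:
--         return "school"
--     return "country/year or aggregated"
-- ===== SOURCE B (Python) =====
-- _RULES = [
--     ("teacher", ("cnttchid", "teacherid")),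
--     ("student", ("cntstuid", "studentid", "stidstd")),
--     ("school", ("cntschid", "schoolid")),
-- ]
--
-- def _unit_of_observation(columns: list[str]) -> str:
--     def go(rules):
--         if not rules:
--             return "country/year or aggregated"
--         cat, keys = rules[0]
--         if any(c.lower() in keys for c in columns):
--             return cat
--         return go(rules[1:])
--     return go(_RULES)
-- ===== Notes on version B (the rewrite author's own statement) =====
-- stated objective: alternative
-- what changed: A builds a set of lowered column names once and runs three guarded membership chains; B builds no set at all: it recurses over a priority-ordered rules table, scanning the columns per rule for that rule's keywords and returning the first rule that matches.
import Mathlib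
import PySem

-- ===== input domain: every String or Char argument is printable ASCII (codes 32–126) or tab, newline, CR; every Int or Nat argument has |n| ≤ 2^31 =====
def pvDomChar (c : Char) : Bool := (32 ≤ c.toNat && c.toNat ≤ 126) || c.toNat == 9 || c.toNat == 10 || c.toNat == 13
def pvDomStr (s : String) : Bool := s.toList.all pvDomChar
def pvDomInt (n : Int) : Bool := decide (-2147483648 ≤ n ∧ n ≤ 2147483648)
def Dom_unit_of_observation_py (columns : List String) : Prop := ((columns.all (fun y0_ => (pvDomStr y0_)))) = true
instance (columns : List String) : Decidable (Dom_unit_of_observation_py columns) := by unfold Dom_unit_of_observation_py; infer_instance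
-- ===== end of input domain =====

-- B builds no lowered set: it recurses over a priority-ordered rules table, scanning the columns per rule; alternative decomposition, same cost.

-- ===== PORT A =====
def unit_of_observation_py (columns : List String) : String :=
  let lowered : PySem.Set String := PySem.Set.ofList (columns.map PySem.Str.lower)
  if lowered.contains "cnttchid" || lowered.contains "teacherid" then "teacher"
  else if lowered.contains "cntstuid" || lowered.contains "studentid" || lowered.contains "stidstd" then "student"
  else if lowered.contains "cntschid" || lowered.contains "schoolid" then "school"
  else "country/year or aggregated"

-- ===== PORT B =====
def pvRules : List (String × List String) :=
  [("teacher", ["cnttchid", "teacherid"]),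
   ("student", ["cntstuid", "studentid", "stidstd"]),
   ("school", ["cntschid", "schoolid"])]

-- B's recursive descent over the rules table (the inner `go` of Source B)
def pvGo (columns : List String) : List (String × List String) → String
  | [] => "country/year or aggregated"
  | (cat, keys) :: rest =>
    if columns.any (fun c => keys.contains (PySem.Str.lower c)) then cat
    else pvGo columns rest

def unit_of_observation_py_alt (columns : List String) : String :=
  pvGo columns pvRules

-- ===== PRECONDITION & SPEC =====
def Spec_unit_of_observation_py (columns : List String) (out : String) : Prop := out = unit_of_observation_py_alt columns
instance (columns : List String) (out : String) : Decidable (Spec_unit_of_observation_py columns out) := by unfold Spec_unit_of_observation_py; infer_instance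

-- ===== CLAIM (what is proved, stated in full; the proofs are below) =====
def Claim_equal_unit_of_observation_py : Prop := ∀ (columns : List String), Dom_unit_of_observation_py columns → Spec_unit_of_observation_py columns (unit_of_observation_py columns)

-- ===== LEMMAS AND PROOFS =====

theorem pv_contains_lower (cols : List String) (x : String) :
    PySem.Set.contains (PySem.Set.ofList (cols.map PySem.Str.lower)) x
      = cols.any (fun c => PySem.Str.lower c == x) := by
  rw [Bool.eq_iff_iff, PySem.Set.contains_iff, PySem.Set.mem_ofList]
  simp [List.any_eq_true, List.mem_map]

theorem pv_any_keys (cols : List String) (keys : List String) :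
    cols.any (fun c => keys.contains (PySem.Str.lower c))
      = keys.any (fun k => cols.any (fun c => PySem.Str.lower c == k)) := by
  rw [Bool.eq_iff_iff]
  simp only [List.any_eq_true, List.contains_eq_mem, decide_eq_true_eq, beq_iff_eq]
  constructor
  · rintro ⟨c, hc, hk⟩
    exact ⟨_, hk, c, hc, rfl⟩
  · rintro ⟨k, hk, c, hc, rfl⟩
    exact ⟨c, hc, hk⟩

-- ===== VERDICT (by name: the statement is the Claim_ definition above) =====
theorem unit_of_observation_py_spec : Claim_equal_unit_of_observation_py := by
  intro columns _
  unfold Spec_unit_of_observation_py unit_of_observation_py unit_of_observation_py_alt pvRules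
  simp only [pv_contains_lower, pvGo, pv_any_keys, List.any_cons, List.any_nil, Bool.or_false,
    Bool.or_assoc]
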